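-- pv_equiv track=rewrite | github.com/junweiin/jwclaw | 1/context_manager.py | _parse_user_md
-- ===== SOURCE A (Python) =====
-- def _parse_user_md(content: str) -> dict:
--     """解析USER.md文件"""
--     profile = {}
--     current_section = "general"
--     profile[current_section] = {}
--
--     for line in content.split('\n'):
--         line = line.strip()
--
--         # 检测章节标题
--         if line.startswith('## '):
--             current_section = line[3:].strip()
--             profile[current_section] = {}
--             continue
--
--         # 检测键值对
--         if ':' in line and not line.startswith('#'):
--             key, _, value = line.partition(':')
--             key = key.strip().strip('-').strip()
--             value = value.strip()
--
--             if key and value: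
--                 profile[current_section][key] = value
--
--     return profile
-- ===== SOURCE B (Python) =====
-- def _split_sections(lines):
--     """Split stripped lines into (general_body, [(name, body), ...]) by building back-to-front."""
--     gen, secs = [], []
--     for line in reversed(lines):
--         if line.startswith('## '):
--             secs = [(line[3:].strip(), gen)] + secs
--             gen = []
--         else:
--             gen = [line] + gen
--     return gen, secs
--
--
-- def _parse_section(lines):
--     sec = {}
--     for line in lines:
--         if ':' in line and not line.startswith('#'):
--             key, _, value = line.partition(':')
--             key = key.strip().strip('-').strip()
--             value = value.strip()
--             if key and value:
--                 sec[key] = value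
--     return sec
--
--
-- def _parse_user_md(content: str) -> dict:
--     """Staged: strip all lines, split them back-to-front into named sections, parse each section independently, then assemble the dict (later duplicate headers overwrite, so sections reset)."""
--     stripped = [l.strip() for l in content.split('\n')]
--     general, sections = _split_sections(stripped)
--     profile = {"general": _parse_section(general)}
--     for name, body in sections:
--         profile[name] = _parse_section(body)
--     return profile
-- ===== Notes on version B (the rewrite author's own statement) =====
-- stated objective: alternative
-- what changed: A's single interleaved stateful pass (mutating a dict-of-dicts with a current-section cursor per line) is replaced by staged passes: strip all lines, split them back-to-front into (name, body) section chunks, parse each chunk independently into key-value pairs, then assemble the result dict so that later duplicate headers overwrite (reset) earlier ones.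
import Mathlib
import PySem

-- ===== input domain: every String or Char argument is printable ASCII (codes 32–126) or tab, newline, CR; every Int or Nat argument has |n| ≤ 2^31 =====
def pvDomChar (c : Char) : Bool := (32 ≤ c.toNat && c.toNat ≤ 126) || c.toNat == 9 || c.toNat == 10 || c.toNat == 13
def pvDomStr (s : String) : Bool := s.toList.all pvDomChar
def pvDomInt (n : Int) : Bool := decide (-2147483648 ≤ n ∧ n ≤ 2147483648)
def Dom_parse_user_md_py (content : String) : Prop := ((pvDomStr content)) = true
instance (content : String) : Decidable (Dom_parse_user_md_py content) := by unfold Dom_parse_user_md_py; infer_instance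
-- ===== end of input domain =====

-- B replaces A's single interleaved stateful pass by staged passes (strip; recursive
-- split into section chunks; independent per-chunk parse; assembly). Objective:
-- alternative decomposition, same cost.

-- ===== PORT A =====
-- line.partition(':') restricted to the (before, after) pieces: exact for Python's str.partition
def pvPartitionColon : List Char → (List Char × List Char)
  | [] => ([], [])
  | c :: cs =>
      if c = ':' then ([], cs)
      else
        let r := pvPartitionColon cs
        (c :: r.1, r.2)

-- one iteration of A's loop over the lines; state = (profile, current_section)
def pvAStep
    (st : PySem.Dict (List Char) (PySem.Dict (List Char) (List Char)) × List Char)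
    (raw : List Char) :
    PySem.Dict (List Char) (PySem.Dict (List Char) (List Char)) × List Char :=
  let line := PySem.Chars.strip raw
  if PySem.Chars.startswith line ['#', '#', ' '] then
    let sec := PySem.Chars.strip (PySem.List.slice line (some 3) none)
    (st.1.insert sec PySem.Dict.empty, sec)
  else if PySem.Chars.isIn [':'] line ∧ ¬ PySem.Chars.startswith line ['#'] then
    let p := pvPartitionColon line
    let key := PySem.Chars.strip (PySem.Chars.stripChars (PySem.Chars.strip p.1) ['-'])
    let value := PySem.Chars.strip p.2
    if key ≠ [] ∧ value ≠ [] then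
      (st.1.insert st.2 ((st.1.getD st.2 PySem.Dict.empty).insert key value), st.2)
    else st
  else st

def parse_user_md_py (content : String) : List (String × List (String × String)) :=
  ((PySem.Chars.splitOn content.toList ['\n']).foldl pvAStep
      (PySem.Dict.empty.insert "general".toList PySem.Dict.empty, "general".toList)).1.items.map
    (fun p => (String.ofList p.1, p.2.items.map (fun q => (String.ofList q.1, String.ofList q.2))))

-- ===== PORT B =====
-- _split_sections: back-to-front (foldr-style) split of the stripped lines into (general_body, [(name, body), …])
def pvSplitSections : List (List Char) → List (List Char) × List (List Char × List (List Char))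
  | [] => ([], [])
  | head :: rest =>
      if PySem.Chars.startswith head ['#', '#', ' '] then
        let r := pvSplitSections rest
        ([], (PySem.Chars.strip (PySem.List.slice head (some 3) none), r.1) :: r.2)
      else
        let r := pvSplitSections rest
        (head :: r.1, r.2)

-- _parse_section: one section's lines into key-value pairs
def pvParseSection (ls : List (List Char)) : PySem.Dict (List Char) (List Char) :=
  ls.foldl (fun sec line =>
    if PySem.Chars.isIn [':'] line ∧ ¬ PySem.Chars.startswith line ['#'] then
      let p := pvPartitionColon line
      let key := PySem.Chars.strip (PySem.Chars.stripChars (PySem.Chars.strip p.1) ['-'])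
      let value := PySem.Chars.strip p.2
      if key ≠ [] ∧ value ≠ [] then sec.insert key value else sec
    else sec) PySem.Dict.empty

-- assembly of the profile dict from the split result ({"general": parse(gen)} then the named sections)
def pvAssemble (r : List (List Char) × List (List Char × List (List Char))) :
    PySem.Dict (List Char) (PySem.Dict (List Char) (List Char)) :=
  r.2.foldl (fun d p => d.insert p.1 (pvParseSection p.2))
    (PySem.Dict.empty.insert "general".toList (pvParseSection r.1))

def parse_user_md_py_alt (content : String) : List (String × List (String × String)) :=
  (pvAssemble (pvSplitSections
      ((PySem.Chars.splitOn content.toList ['\n']).map PySem.Chars.strip))).items.map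
    (fun p => (String.ofList p.1, p.2.items.map (fun q => (String.ofList q.1, String.ofList q.2))))

-- ===== PRECONDITION & SPEC =====
def Spec_parse_user_md_py (content : String) (out : List (String × List (String × String))) : Prop := out = parse_user_md_py_alt content
instance (content : String) (out : List (String × List (String × String))) : Decidable (Spec_parse_user_md_py content out) := by unfold Spec_parse_user_md_py; infer_instance

-- ===== CLAIM (what is proved, stated in full; the proofs are below) =====
def Claim_equal_parse_user_md_py : Prop := ∀ (content : String), Dom_parse_user_md_py content → Spec_parse_user_md_py content (parse_user_md_py content)

-- ===== LEMMAS AND PROOFS =====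

-- A's step with the stripping factored out (pvAStep st raw = pvStepS st (strip raw) by rfl)
def pvStepS
    (st : PySem.Dict (List Char) (PySem.Dict (List Char) (List Char)) × List Char)
    (line : List Char) :
    PySem.Dict (List Char) (PySem.Dict (List Char) (List Char)) × List Char :=
  if PySem.Chars.startswith line ['#', '#', ' '] then
    let sec := PySem.Chars.strip (PySem.List.slice line (some 3) none)
    (st.1.insert sec PySem.Dict.empty, sec)
  else if PySem.Chars.isIn [':'] line ∧ ¬ PySem.Chars.startswith line ['#'] then
    let p := pvPartitionColon line
    let key := PySem.Chars.strip (PySem.Chars.stripChars (PySem.Chars.strip p.1) ['-'])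
    let value := PySem.Chars.strip p.2
    if key ≠ [] ∧ value ≠ [] then
      (st.1.insert st.2 ((st.1.getD st.2 PySem.Dict.empty).insert key value), st.2)
    else st
  else st

-- B's per-line parse step, so that pvParseSection ls = ls.foldl pvKV Dict.empty (rfl)
def pvKV (sec : PySem.Dict (List Char) (List Char)) (line : List Char) :
    PySem.Dict (List Char) (List Char) :=
  if PySem.Chars.isIn [':'] line ∧ ¬ PySem.Chars.startswith line ['#'] then
    let p := pvPartitionColon line
    let key := PySem.Chars.strip (PySem.Chars.stripChars (PySem.Chars.strip p.1) ['-'])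
    let value := PySem.Chars.strip p.2
    if key ≠ [] ∧ value ≠ [] then sec.insert key value else sec
  else sec

lemma pvInsert_same {κ ν : Type} [BEq κ] [LawfulBEq κ] (d : PySem.Dict κ ν) (k : κ) (v : ν)
    (hnd : d.keys.Nodup) (h : d.get? k = some v) : d.insert k v = d := by
  apply PySem.Dict.ext
  rw [PySem.Dict.items_insert]
  have hc : d.contains k = true := by
    rw [PySem.Dict.contains_eq_isSome_get?, h]; rfl
  simp only [hc, if_true]
  conv_rhs => rw [← List.map_id d.items]
  apply List.map_congr_left
  intro p hp
  by_cases hpk : p.1 == k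
  · have hk : p.1 = k := by exact eq_of_beq hpk
    have : d.get? k = some p.2 := by
      apply PySem.Dict.get?_of_mem_items _ _ hnd
      rw [← hk]; exact hp
    rw [h] at this
    obtain ⟨rfl⟩ := this
    simp [← hk]
  · simp [hpk]

-- the accumulator that assembles B's profile from section chunks
def pvIns (d : PySem.Dict (List Char) (PySem.Dict (List Char) (List Char)))
    (p : List Char × List (List Char)) :
    PySem.Dict (List Char) (PySem.Dict (List Char) (List Char)) :=
  d.insert p.1 (pvParseSection p.2)

lemma pvMain (ls : List (List Char)) :
    ∀ (d : PySem.Dict (List Char) (PySem.Dict (List Char) (List Char))) (c : List Char)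
      (old : PySem.Dict (List Char) (List Char)),
    d.keys.Nodup → d.get? c = some old →
    (ls.foldl pvStepS (d, c)).1 =
      (pvSplitSections ls).2.foldl pvIns
        (d.insert c ((pvSplitSections ls).1.foldl pvKV old)) := by
  induction ls with
  | nil =>
    intro d c old hnd hold
    simp only [List.foldl_nil, pvSplitSections]
    rw [pvInsert_same d c old hnd hold]
  | cons l ls ih =>
    intro d c old hnd hold
    simp only [List.foldl_cons]
    by_cases h1 : PySem.Chars.startswith l ['#', '#', ' ']
    · have hstep : pvStepS (d, c) l =
          (d.insert (PySem.Chars.strip (PySem.List.slice l (some 3) none)) PySem.Dict.empty,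
           PySem.Chars.strip (PySem.List.slice l (some 3) none)) := by
        simp [pvStepS, h1]
      rw [hstep,
        ih _ _ PySem.Dict.empty
          (PySem.Dict.nodup_keys_insert _ _ _ hnd)
          (PySem.Dict.get?_insert_self _ _ _)]
      have hsplit : pvSplitSections (l :: ls) =
          ([], (PySem.Chars.strip (PySem.List.slice l (some 3) none),
                (pvSplitSections ls).1) :: (pvSplitSections ls).2) := by
        simp [pvSplitSections, h1]
      rw [hsplit]
      simp only [List.foldl_nil, List.foldl_cons, pvIns,
        PySem.Dict.insert_insert_self]
      rw [pvInsert_same d c old hnd hold]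
      rfl
    · have hgd : d.getD c PySem.Dict.empty = old :=
        PySem.Dict.getD_of_get?_eq_some _ _ hold
      have hstep : pvStepS (d, c) l = (d.insert c (pvKV old l), c) := by
        simp only [pvStepS, pvKV, h1, Bool.false_eq_true, if_false, hgd]
        split_ifs
        · rfl
        · rw [pvInsert_same d c old hnd hold]
        · rw [pvInsert_same d c old hnd hold]
      rw [hstep,
        ih _ _ (pvKV old l)
          (PySem.Dict.nodup_keys_insert _ _ _ hnd)
          (PySem.Dict.get?_insert_self _ _ _)]
      have hsplit : pvSplitSections (l :: ls) =
          (l :: (pvSplitSections ls).1, (pvSplitSections ls).2) := by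
        simp [pvSplitSections, h1]
      rw [hsplit]
      simp only [List.foldl_cons, PySem.Dict.insert_insert_self]

-- ===== VERDICT (by name: the statement is the Claim_ definition above) =====
theorem parse_user_md_py_spec : Claim_equal_parse_user_md_py := by
  intro content _
  unfold Spec_parse_user_md_py parse_user_md_py parse_user_md_py_alt
  have hfold : (PySem.Chars.splitOn content.toList ['\n']).foldl pvAStep
        (PySem.Dict.empty.insert "general".toList PySem.Dict.empty, "general".toList) =
      ((PySem.Chars.splitOn content.toList ['\n']).map PySem.Chars.strip).foldl pvStepS
        (PySem.Dict.empty.insert "general".toList PySem.Dict.empty, "general".toList) := by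
    rw [List.foldl_map]
    rfl
  rw [hfold,
    pvMain _ _ _ PySem.Dict.empty
      (PySem.Dict.nodup_keys_insert _ _ _ PySem.Dict.nodup_keys_empty)
      (PySem.Dict.get?_insert_self _ _ _)]
  unfold pvAssemble pvIns
  rw [PySem.Dict.insert_insert_self]
  rfl
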